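-- pv_equiv track=rewrite | github.com/timvdven/PolAssessment | DataGenerator/generate_random_anpr_json.py | group_letters_and_digits
-- ===== SOURCE A (Python) =====
-- def group_letters_and_digits(s: str) -> list:
--     if not s:
--         return []
--
--     groups = []
--     current_group = s[0]
--
--     for char in s[1:]:
--         if (char.isdigit() and current_group[-1].isdigit()) or (char.isalpha() and current_group[-1].isalpha()):
--             current_group += char
--         else:
--             groups.append(current_group)
--             current_group = char
--
--     if (len(current_group) == 4):
--         groups.append(current_group[:2])
--         groups.append(current_group[2:])
--     else:
--         groups.append(current_group)
--     return groups
-- ===== SOURCE B (Python) =====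
-- def group_letters_and_digits(s: str) -> list:
--     if not s:
--         return []
--     n = len(s)
--     breaks = [i for i in range(1, n)
--               if not ((s[i - 1].isdigit() and s[i].isdigit())
--                       or (s[i - 1].isalpha() and s[i].isalpha()))]
--     bounds = [0] + breaks + [n]
--     groups = [s[a:b] for a, b in zip(bounds, bounds[1:])]
--     last = groups[-1]
--     if len(last) == 4:
--         groups[-1:] = [last[:2], last[2:]]
--     return groups
-- ===== Notes on version B (the rewrite author's own statement) =====
-- stated objective: alternative
-- what changed: A accumulates a current_group string while scanning and flushes it at each class change; B instead scans once for break indices, builds a boundary list [0]+breaks+[n], produces the groups by slicing between consecutive boundaries, and then applies the same split-last-group-of-length-4 step.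
import Mathlib
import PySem

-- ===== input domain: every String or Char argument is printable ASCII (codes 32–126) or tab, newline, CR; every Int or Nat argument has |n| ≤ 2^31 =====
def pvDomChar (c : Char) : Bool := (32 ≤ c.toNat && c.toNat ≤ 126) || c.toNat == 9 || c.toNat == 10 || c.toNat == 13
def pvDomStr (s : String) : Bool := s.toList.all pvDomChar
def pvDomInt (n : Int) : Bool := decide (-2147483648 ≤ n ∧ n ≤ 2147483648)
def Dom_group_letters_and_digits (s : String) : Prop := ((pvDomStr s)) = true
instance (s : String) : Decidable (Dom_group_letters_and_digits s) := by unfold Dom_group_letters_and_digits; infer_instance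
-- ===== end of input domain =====

-- B replaces A's accumulate-current-group loop by a scan for break indices followed by slicing
-- between consecutive boundaries (objective: alternative decomposition, same cost).

-- ===== PORT A =====
-- shared character-pair test: both chars digits or both chars letters (Python:
-- (x.isdigit() and y.isdigit()) or (x.isalpha() and y.isalpha()))
def pvSame (x y : Char) : Bool :=
  (PySem.Chars.isdigit x && PySem.Chars.isdigit y) || (PySem.Chars.isalpha x && PySem.Chars.isalpha y)

-- A's loop body: extend current_group or flush it and restart; current_group[-1] is
-- getLast! (current_group is always nonempty)
def pvStepA (st : List (List Char) × List Char) (ch : Char) : List (List Char) × List Char :=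
  if pvSame ch st.2.getLast! then (st.1, st.2 ++ [ch]) else (st.1 ++ [st.2], [ch])

-- literal port of A: fold over s[1:] carrying (groups, current_group); the final length-4
-- split current[:2]/current[2:] is take 2/drop 2 (exact: nonnegative in-range bounds).
def group_letters_and_digits (s : String) : List String :=
  match s.toList with
  | [] => []
  | c :: rest =>
    let st := rest.foldl pvStepA ([], [c])
    let groups := if st.2.length == 4
      then st.1 ++ [st.2.take 2, st.2.drop 2]
      else st.1 ++ [st.2]
    groups.map (fun g => String.ofList g)

-- ===== PORT B =====
-- B-side helper: [s[a:b] for a, b in zip(bounds, bounds[1:])]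
-- (s[a:b] is drop/take — exact here since 0 ≤ a ≤ b ≤ len s)
def pvSliceGroups (cs : List Char) (bounds : List Nat) : List (List Char) :=
  (bounds.zip bounds.tail).map (fun ab => (cs.drop ab.1).take (ab.2 - ab.1))

-- B-side helper: last = groups[-1]; if len(last) == 4: groups[-1:] = [last[:2], last[2:]]
def pvFixLast (gs : List (List Char)) : List (List Char) :=
  if (gs.getLast?.getD []).length == 4
  then gs.dropLast ++ [(gs.getLast?.getD []).take 2, (gs.getLast?.getD []).drop 2]
  else gs

-- literal port of B: collect break indices (range(1, n) is range' 1 (n-1); s[i] for these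
-- in-range indices is getD i ' ', exact), slice between consecutive boundaries, fix the last group.
def group_letters_and_digits_alt (s : String) : List String :=
  let cs := s.toList
  if cs = [] then []
  else
    let n := cs.length
    let breaks := (List.range' 1 (n - 1)).filter
      (fun i => !pvSame (cs.getD (i - 1) ' ') (cs.getD i ' '))
    let bounds := 0 :: breaks ++ [n]
    (pvFixLast (pvSliceGroups cs bounds)).map (fun g => String.ofList g)

-- ===== PRECONDITION & SPEC =====
def Spec_group_letters_and_digits (s : String) (out : List String) : Prop := out = group_letters_and_digits_alt s
instance (s : String) (out : List String) : Decidable (Spec_group_letters_and_digits s out) := by unfold Spec_group_letters_and_digits; infer_instance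

-- ===== CLAIM (what is proved, stated in full; the proofs are below) =====
def Claim_equal_group_letters_and_digits : Prop := ∀ (s : String), Dom_group_letters_and_digits s → Spec_group_letters_and_digits s (group_letters_and_digits s)

-- ===== LEMMAS AND PROOFS =====

-- the common reference grouping: split `cur ++ rest` into maximal runs, `cur` being the
-- (nonempty) run under construction
def pvChop : List Char → List Char → List (List Char)
  | cur, [] => [cur]
  | cur, c :: rest =>
    if pvSame c cur.getLast! then pvChop (cur ++ [c]) rest
    else cur :: pvChop [c] rest

lemma pvChop_ne_nil (cur rest : List Char) : pvChop cur rest ≠ [] := by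
  induction rest generalizing cur with
  | nil => simp [pvChop]
  | cons c rest ih =>
    simp only [pvChop]
    split
    · exact ih _
    · simp

lemma pvSame_comm (x y : Char) : pvSame x y = pvSame y x := by
  simp [pvSame, Bool.and_comm, Bool.or_comm]

lemma pvFixLast_cons (a : List Char) (gs : List (List Char)) (h : gs ≠ []) :
    pvFixLast (a :: gs) = a :: pvFixLast gs := by
  match gs, h with
  | b :: gs', _ =>
    unfold pvFixLast
    rw [List.getLast?_cons_cons, List.dropLast_cons₂]
    split <;> simp

-- A's loop followed by its finalization equals groups ++ pvFixLast (pvChop cur rest)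
lemma pvA_loop (rest : List Char) (groups : List (List Char)) (cur : List Char) :
    (if (rest.foldl pvStepA (groups, cur)).2.length == 4
     then (rest.foldl pvStepA (groups, cur)).1
            ++ [(rest.foldl pvStepA (groups, cur)).2.take 2,
                (rest.foldl pvStepA (groups, cur)).2.drop 2]
     else (rest.foldl pvStepA (groups, cur)).1 ++ [(rest.foldl pvStepA (groups, cur)).2])
    = groups ++ pvFixLast (pvChop cur rest) := by
  induction rest generalizing groups cur with
  | nil =>
    simp only [List.foldl_nil, pvChop, pvFixLast]
    split <;> simp_all
  | cons c rest ih =>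
    simp only [List.foldl_cons, pvStepA]
    by_cases h : pvSame c cur.getLast!
    · simpa only [pvChop, h, if_pos] using ih groups (cur ++ [c])
    · simp only [h, Bool.false_eq_true, if_neg, not_false_iff, pvChop]
      rw [ih (groups ++ [cur]) [c],
        pvFixLast_cons cur _ (pvChop_ne_nil _ _), List.append_assoc]
      rfl

-- prepending characters into the first group
def pvPrependInto (p : List Char) : List (List Char) → List (List Char)
  | [] => []
  | g :: gs => (p ++ g) :: gs

lemma pvPrependInto_prependInto (p q : List Char) (gs : List (List Char)) :
    pvPrependInto p (pvPrependInto q gs) = pvPrependInto (p ++ q) gs := by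
  cases gs <;> simp [pvPrependInto]

lemma pvGetLast!_concat (l : List Char) (c : Char) : (l ++ [c]).getLast! = c := by
  simp [List.getLast!_eq_getLast?_getD]

lemma pvChop_append (cur : List Char) (c : Char) (rest : List Char) :
    pvChop (cur ++ [c]) rest = pvPrependInto cur (pvChop [c] rest) := by
  induction rest generalizing cur c with
  | nil => simp [pvChop, pvPrependInto]
  | cons d rest ih =>
    simp only [pvChop, pvGetLast!_concat]
    rw [show ([c] : List Char).getLast! = c from rfl]
    by_cases h : pvSame d c
    · rw [if_pos h, if_pos h, ih (cur ++ [c]) d, ih [c] d, pvPrependInto_prependInto]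
    · rw [if_neg h, if_neg h]
      rfl

-- shifting every boundary by one steps from c :: cs into cs
lemma pvSliceGroups_shift (c : Char) (cs : List Char) (bs : List Nat) :
    pvSliceGroups (c :: cs) (bs.map (· + 1)) = pvSliceGroups cs bs := by
  unfold pvSliceGroups
  rw [← List.map_tail, List.zip_map, List.map_map]
  refine List.map_congr_left ?_
  intro ⟨a, b⟩ _
  simp [Nat.succ_sub_succ]

lemma pvSliceGroups_cons₂ (cs : List Char) (a b : Nat) (bs : List Nat) :
    pvSliceGroups cs (a :: b :: bs) = ((cs.drop a).take (b - a)) :: pvSliceGroups cs (b :: bs) := by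
  simp [pvSliceGroups]

-- range' shifted by one
lemma pvRange'_shift (s n : Nat) : List.range' (s + 1) n = (List.range' s n).map (· + 1) := by
  induction n generalizing s with
  | zero => simp
  | succ n ih => rw [List.range'_succ, List.range'_succ, ih (s + 1)]; simp

-- the break list of c :: d :: rest in terms of the break list of d :: rest
lemma pvBreaks_cons (c d : Char) (rest : List Char) :
    (List.range' 1 ((c :: d :: rest).length - 1)).filter
        (fun i => !pvSame ((c :: d :: rest).getD (i - 1) ' ') ((c :: d :: rest).getD i ' '))
    = (if pvSame c d then [] else [1])
      ++ ((List.range' 1 ((d :: rest).length - 1)).filter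
            (fun i => !pvSame ((d :: rest).getD (i - 1) ' ') ((d :: rest).getD i ' '))).map (· + 1) := by
  have h1 : (c :: d :: rest).length - 1 = rest.length + 1 := by simp
  have h2 : (d :: rest).length - 1 = rest.length := by simp
  rw [h1, h2, List.range'_succ, List.filter_cons, pvRange'_shift, List.filter_map]
  have hcong : ∀ i ∈ List.range' 1 rest.length,
      ((fun i => !pvSame ((c :: d :: rest).getD (i - 1) ' ') ((c :: d :: rest).getD i ' ')) ∘ (· + 1)) i
      = (fun i => !pvSame ((d :: rest).getD (i - 1) ' ') ((d :: rest).getD i ' ')) i := by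
    intro i hi
    obtain ⟨h1i, _⟩ := List.mem_range'_1.mp hi
    obtain ⟨j, rfl⟩ := Nat.exists_eq_add_of_le h1i
    simp [Nat.add_comm 1 j]
  rw [List.filter_congr hcong]
  by_cases h : pvSame c d <;> simp [h]

-- merge case: c continues the first run of d :: rest
lemma pvCaseMerge (c d : Char) (rest : List Char) (tb : List Nat)
    (hIH : pvSliceGroups (d :: rest) (0 :: tb) = pvChop [d] rest)
    (h : pvSame c d = true) :
    pvSliceGroups (c :: d :: rest) (0 :: tb.map (· + 1)) = pvChop [c] (d :: rest) := by
  rcases tb with _ | ⟨t0, tb'⟩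
  · simp [pvSliceGroups] at hIH
    exact absurd hIH (pvChop_ne_nil _ _)
  · rw [List.map_cons, pvSliceGroups_cons₂]
    have hshift := pvSliceGroups_shift c (d :: rest) (t0 :: tb')
    rw [List.map_cons] at hshift
    rw [hshift]
    have hr : pvChop [c] (d :: rest) = pvPrependInto [c] (pvChop [d] rest) := by
      simp only [pvChop]
      rw [show ([c] : List Char).getLast! = c from rfl, pvSame_comm d c, if_pos h]
      exact pvChop_append [c] d rest
    rw [hr, ← hIH, pvSliceGroups_cons₂]
    simp [pvPrependInto, List.take_succ_cons]
-- break case: a boundary falls between c and d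
lemma pvCaseBreak (c d : Char) (rest : List Char) (tb : List Nat)
    (hIH : pvSliceGroups (d :: rest) (0 :: tb) = pvChop [d] rest)
    (h : pvSame c d = false) :
    pvSliceGroups (c :: d :: rest) (0 :: 1 :: tb.map (· + 1)) = pvChop [c] (d :: rest) := by
  rw [pvSliceGroups_cons₂,
    show (1 :: tb.map (· + 1) : List Nat) = (0 :: tb).map (· + 1) from rfl,
    pvSliceGroups_shift, hIH]
  simp only [pvChop]
  rw [show ([c] : List Char).getLast! = c from rfl, pvSame_comm d c, if_neg (by simp [h])]
  rfl

-- B's core grouping equals the reference grouping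
lemma pvB_core (c : Char) (rest : List Char) :
    pvSliceGroups (c :: rest)
      ((0 :: ((List.range' 1 ((c :: rest).length - 1)).filter
        (fun i => !pvSame ((c :: rest).getD (i - 1) ' ') ((c :: rest).getD i ' ')))) ++ [(c :: rest).length])
    = pvChop [c] rest := by
  induction rest generalizing c with
  | nil => simp [pvSliceGroups, pvChop]
  | cons d rest ih =>
    rw [pvBreaks_cons]
    have hIH : pvSliceGroups (d :: rest)
        (0 :: (((List.range' 1 ((d :: rest).length - 1)).filter
          (fun i => !pvSame ((d :: rest).getD (i - 1) ' ') ((d :: rest).getD i ' '))) ++ [(d :: rest).length]))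
        = pvChop [d] rest := by
      rw [← List.cons_append]
      exact ih d
    by_cases h : pvSame c d
    · rw [if_pos h]
      have hb : ((0 : Nat) :: ([] ++ ((List.range' 1 ((d :: rest).length - 1)).filter
            (fun i => !pvSame ((d :: rest).getD (i - 1) ' ') ((d :: rest).getD i ' '))).map (· + 1)))
            ++ [(c :: d :: rest).length]
          = 0 :: (((List.range' 1 ((d :: rest).length - 1)).filter
              (fun i => !pvSame ((d :: rest).getD (i - 1) ' ') ((d :: rest).getD i ' ')))
              ++ [(d :: rest).length]).map (· + 1) := by
        simp
      rw [hb]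
      exact pvCaseMerge c d rest _ hIH h
    · rw [if_neg h]
      have hb : ((0 : Nat) :: ([1] ++ ((List.range' 1 ((d :: rest).length - 1)).filter
            (fun i => !pvSame ((d :: rest).getD (i - 1) ' ') ((d :: rest).getD i ' '))).map (· + 1)))
            ++ [(c :: d :: rest).length]
          = 0 :: 1 :: (((List.range' 1 ((d :: rest).length - 1)).filter
              (fun i => !pvSame ((d :: rest).getD (i - 1) ' ') ((d :: rest).getD i ' ')))
              ++ [(d :: rest).length]).map (· + 1) := by
        simp
      rw [hb]
      exact pvCaseBreak c d rest _ hIH (by simpa using h)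

-- ===== VERDICT (by name: the statement is the Claim_ definition above) =====
theorem group_letters_and_digits_spec : Claim_equal_group_letters_and_digits := by
  intro s _
  unfold Spec_group_letters_and_digits group_letters_and_digits group_letters_and_digits_alt
  cases hs : s.toList with
  | nil => simp
  | cons c rest =>
    simp only [List.cons_ne_nil, if_neg, not_false_iff]
    rw [pvA_loop rest [] [c], pvB_core c rest]
    simp
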